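-- pv_equiv track=rewrite | github.com/a-chernobrov/leaks-data | bulk_search.py | find_email_domain
-- ===== SOURCE A (Python) =====
-- def match_domain(candidate: str, domain_set: set):
--     if not candidate:
--         return None
--     candidate = candidate.lower().strip(".")
--     if candidate in domain_set:
--         return candidate
--     parts = candidate.split(".")
--     for i in range(1, len(parts)):
--         suffix = ".".join(parts[i:])
--         if suffix in domain_set:
--             return suffix
--     return None
--
-- def find_email_domain(line: str, domain_set: set):
--     idx = 0
--     length = len(line)
--     while True:
--         at = line.find("@", idx)
--         if at == -1:
--             return None
--         end = at + 1
--         while end < length and (line[end].isalnum() or line[end] in ".-"):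
--             end += 1
--         candidate = line[at + 1 : end]
--         matched = match_domain(candidate, domain_set)
--         if matched:
--             return matched
--         idx = end
-- ===== SOURCE B (Python) =====
-- def _domain_suffix_match(candidate, domain_set):
--     if not candidate:
--         return None
--     rest = candidate.lower().strip(".")
--     if rest in domain_set:
--         return rest
--     while "." in rest:
--         rest = rest[rest.index(".") + 1:]
--         if rest in domain_set:
--             return rest
--     return None
--
-- def find_email_domain(line, domain_set):
--     for seg in line.split("@")[1:]:
--         cand = []
--         for ch in seg:
--             if ch.isalnum() or ch in ".-":
--                 cand.append(ch)
--             else: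
--                 break
--         m = _domain_suffix_match("".join(cand), domain_set)
--         if m:
--             return m
--     return None
-- ===== Notes on version B (the rewrite author's own statement) =====
-- stated objective: alternative
-- what changed: B splits the line once on '@' and walks the segments (and, inside the matcher, walks dot-suffixes by repeated index/slice) instead of A's index-based find('@', idx) rescanning loop and split('.')/join suffix reconstruction.
import Mathlib
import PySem

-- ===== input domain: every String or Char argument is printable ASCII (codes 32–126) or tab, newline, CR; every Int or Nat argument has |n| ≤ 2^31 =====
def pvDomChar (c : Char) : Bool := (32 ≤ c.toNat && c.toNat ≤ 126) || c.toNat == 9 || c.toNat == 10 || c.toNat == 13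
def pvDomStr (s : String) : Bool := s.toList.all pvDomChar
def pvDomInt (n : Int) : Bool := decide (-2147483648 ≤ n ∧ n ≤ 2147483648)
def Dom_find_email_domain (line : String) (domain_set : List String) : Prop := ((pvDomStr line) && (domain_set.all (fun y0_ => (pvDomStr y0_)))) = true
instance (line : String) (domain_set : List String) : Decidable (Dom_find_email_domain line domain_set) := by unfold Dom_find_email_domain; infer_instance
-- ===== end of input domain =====

-- B rewrites A's find('@', idx) rescanning loop as one split on '@' plus a dot-suffix walk (alternative decomposition, same cost).

-- ===== PORT A =====
-- `c.isalnum() or c in ".-"` on a single character (membership in the 2-char literal is the disjunction; exact)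
def wcA (c : Char) : Bool := PySem.Str.isalnum c || (c == '.' || c == '-')

-- `for i in range(1, len(parts)): suffix = ".".join(parts[i:]); if suffix in domain_set: return suffix`
def mdLoopA (domain_set : List String) (parts : List (List Char)) : List Int → Option (List Char)
  | [] => none
  | i :: is =>
    let suffix := PySem.Chars.join ['.'] (PySem.List.slice parts (some i) none)
    if domain_set.contains (String.mk suffix) then some suffix else mdLoopA domain_set parts is

-- match_domain, over List Char
def match_domainA (candidate : List Char) (domain_set : List String) : Option (List Char) :=
  if candidate = [] then none
  else
    let cand := PySem.Chars.stripChars (PySem.Chars.lower candidate) ['.']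
    if domain_set.contains (String.mk cand) then some cand
    else
      let parts := (PySem.Chars.split? cand ['.']).getD []   -- sep "." is nonempty: split? never raises
      mdLoopA domain_set parts (PySem.List.pyRange 1 parts.length)

-- `while end < length and (line[end].isalnum() or line[end] in ".-"): end += 1`
def fedEndA (s : List Char) (e : Nat) : Nat :=
  if h : e < s.length then
    if wcA (s[e]) then fedEndA s (e + 1) else e
  else e
termination_by s.length - e

-- the `while True` scan; fuel only makes the loop total (idx strictly increases, length+1 steps suffice)
def fedLoopA (s : List Char) (domain_set : List String) (idx : Nat) : Nat → Option (List Char)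
  | 0 => none
  | fuel + 1 =>
    let at_ := PySem.Chars.findFrom s ['@'] (idx : Int)
    if at_ = -1 then none
    else
      let e := fedEndA s (at_.toNat + 1)
      let candidate := PySem.List.slice s (some (at_ + 1)) (some (e : Int))
      match match_domainA candidate domain_set with
      | some m => if m = [] then fedLoopA s domain_set e fuel else some m
      | none => fedLoopA s domain_set e fuel

def find_email_domain (line : String) (domain_set : List String) : Option String :=
  (fedLoopA line.toList domain_set 0 (line.toList.length + 1)).map String.mk

-- ===== PORT B =====
def wcB (c : Char) : Bool := PySem.Chars.isalnum c || (c == '.' || c == '-')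

-- `for ch in seg: if ch.isalnum() or ch in ".-": cand.append(ch) else: break`
def takeRunB : List Char → List Char
  | [] => []
  | c :: r => if wcB c then c :: takeRunB r else []

-- `while "." in rest: rest = rest[rest.index(".") + 1:]; if rest in domain_set: return rest`
def dotLoopB (domain_set : List String) (rest : List Char) : Option (List Char) :=
  if h : PySem.Chars.isIn ['.'] rest then
    let r' := PySem.List.slice rest (some (PySem.Chars.find rest ['.'] + 1)) none
    if domain_set.contains (String.mk r') then some r' else dotLoopB domain_set r'
  else none
termination_by rest.length
decreasing_by
  have h0 : 0 ≤ PySem.Chars.find rest ['.'] := by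
    rw [PySem.Chars.find_nonneg_iff]
    exact (PySem.Chars.isIn_iff_infix _ _).mp h
  have hsp := (PySem.Chars.find_spec h0).1
  have hlt : (PySem.Chars.find rest ['.']).toNat < rest.length := by
    rcases hsp with ⟨w, hw⟩
    have : rest.drop (PySem.Chars.find rest ['.']).toNat ≠ [] := by
      intro hnil; rw [hnil] at hw; simp at hw
    have hp := List.length_pos_of_ne_nil this
    simp only [List.length_drop] at hp
    omega
  rw [PySem.List.slice_from _ (by omega : (0:Int) ≤ PySem.Chars.find rest ['.'] + 1)]
  simp only [List.length_drop]
  omega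

def suffixMatchB (candidate : List Char) (domain_set : List String) : Option (List Char) :=
  if candidate = [] then none
  else
    let rest := PySem.Chars.stripChars (PySem.Chars.lower candidate) ['.']
    if domain_set.contains (String.mk rest) then some rest
    else dotLoopB domain_set rest

def fedLoopB (domain_set : List String) : List (List Char) → Option (List Char)
  | [] => none
  | seg :: rest =>
    match suffixMatchB (takeRunB seg) domain_set with
    | some m => if m = [] then fedLoopB domain_set rest else some m
    | none => fedLoopB domain_set rest

def find_email_domain_alt (line : String) (domain_set : List String) : Option String :=
  let segs := (PySem.Chars.split? line.toList ['@']).getD []   -- sep "@" nonempty: never raises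
  (fedLoopB domain_set (PySem.List.slice segs (some 1) none)).map String.mk

-- ===== PRECONDITION & SPEC =====
-- A is total (the scanning loop strictly advances and nothing raises), so no Pre_ is needed.
def Spec_find_email_domain (line : String) (domain_set : List String) (out : Option String) : Prop := out = find_email_domain_alt line domain_set
instance (line : String) (domain_set : List String) (out : Option String) : Decidable (Spec_find_email_domain line domain_set out) := by unfold Spec_find_email_domain; infer_instance

-- ===== CLAIM (what is proved, stated in full; the proofs are below) =====
def Claim_equal_find_email_domain : Prop := ∀ (line : String) (domain_set : List String), Dom_find_email_domain line domain_set → Spec_find_email_domain line domain_set (find_email_domain line domain_set)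

-- ===== LEMMAS AND PROOFS =====

-- structural model of Python's single-character split
def mySplit (d : Char) : List Char → List (List Char)
  | [] => [[]]
  | c :: r => if c = d then [] :: mySplit d r else (mySplit d r).modifyHead (c :: ·)

theorem mySplit_ne_nil (d : Char) (s : List Char) : mySplit d s ≠ [] := by
  induction s with
  | nil => simp [mySplit]
  | cons c r ih =>
    simp only [mySplit]
    split
    · simp
    · cases h : mySplit d r with
      | nil => exact absurd h ih
      | cons p ps => simp

theorem splitOn_go_eq (d : Char) : ∀ (l : List Char) (fuel : Nat) (cur : List Char) (acc : List (List Char)),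
    l.length < fuel →
    PySem.Chars.splitOn.go [d] fuel l cur acc = acc.reverse ++ (mySplit d l).modifyHead (cur.reverse ++ ·) := by
  intro l
  induction l with
  | nil =>
    intro fuel cur acc h
    match fuel, h with
    | fuel + 1, _ => simp [PySem.Chars.splitOn.go, mySplit]
  | cons c r ih =>
    intro fuel cur acc h
    match fuel, h with
    | fuel + 1, h =>
      simp only [PySem.Chars.splitOn.go]
      have hlen : r.length < fuel := by simp at h; omega
      by_cases hp : [d].isPrefixOf (c :: r) = true
      · have hcd : d = c := by simpa [List.isPrefixOf] using hp
        have hdrop : List.drop [d].length (c :: r) = r := by simp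
        simp only [hp, if_true, hdrop]
        rw [ih _ _ _ hlen]
        simp only [mySplit, hcd.symm, if_true, List.modifyHead_cons]
        cases hms : mySplit d r with
        | nil => simp
        | cons p ps => simp
      · have hcd : ¬ c = d := by intro he; exact absurd hp (by simp [List.isPrefixOf, he])
        simp only [Bool.not_eq_true] at hp
        simp only [hp, Bool.false_eq_true, if_false]
        rw [ih _ _ _ hlen]
        simp only [mySplit, hcd, if_false]
        cases hms : mySplit d r with
        | nil => simp
        | cons p ps => simp [List.modifyHead]

theorem splitOn_eq (d : Char) (s : List Char) : PySem.Chars.splitOn s [d] = mySplit d s := by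
  rw [PySem.Chars.splitOn, splitOn_go_eq d s (s.length + 1) [] [] (by omega)]
  cases hms : mySplit d s with
  | nil => simp
  | cons p ps => simp

theorem find_go_shift (d : Char) : ∀ (l : List Char) (k : Nat),
    PySem.Chars.find.go [d] l k =
      if PySem.Chars.find.go [d] l 0 = -1 then -1 else PySem.Chars.find.go [d] l 0 + k := by
  intro l
  induction l with
  | nil => intro k; simp [PySem.Chars.find.go]
  | cons c t ih =>
    intro k
    have hb : -1 ≤ PySem.Chars.find.go [d] t 0 := PySem.Chars.neg_one_le_find (s := t) (sub := [d])
    simp only [PySem.Chars.find.go]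
    by_cases hp : [d].isPrefixOf (c :: t) = true
    · simp [hp]
    · simp only [Bool.not_eq_true] at hp
      simp only [hp, Bool.false_eq_true, if_false]
      rw [ih (k+1), ih 1]
      split_ifs <;> push_cast <;> omega

theorem find_nil' (d : Char) : PySem.Chars.find [] [d] = -1 := by
  simp [PySem.Chars.find, PySem.Chars.find.go]

theorem find_cons (d c : Char) (t : List Char) :
    PySem.Chars.find (c :: t) [d] =
      if c = d then 0 else (if PySem.Chars.find t [d] = -1 then -1 else PySem.Chars.find t [d] + 1) := by
  have h1 : PySem.Chars.find (c :: t) [d]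
      = if [d].isPrefixOf (c :: t) then ((0:Nat) : Int) else PySem.Chars.find.go [d] t 1 := by
    rfl
  have h2 : ([d].isPrefixOf (c :: t)) = (c == d) := by
    simp [List.isPrefixOf, BEq.comm]
  rw [h1, h2, find_go_shift]
  by_cases hcd : c = d
  · simp [hcd]
  · have hf : (c == d) = false := by simp [hcd]
    simp only [hf, Bool.false_eq_true, if_false, hcd]
    have hgo : PySem.Chars.find.go [d] t 0 = PySem.Chars.find t [d] := rfl
    rw [hgo]
    split_ifs <;> simp

theorem find_single (d : Char) : ∀ (s : List Char),
    (PySem.Chars.find s [d] = -1 ∧ d ∉ s) ∨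
    ∃ b t, s = b ++ d :: t ∧ d ∉ b ∧ PySem.Chars.find s [d] = b.length := by
  intro s
  induction s with
  | nil => exact Or.inl ⟨find_nil' d, by simp⟩
  | cons c t ih =>
    rw [find_cons]
    by_cases hcd : c = d
    · exact Or.inr ⟨[], t, by simp [hcd], by simp, by simp [hcd]⟩
    · rcases ih with ⟨h1, h2⟩ | ⟨b, t', he, hb, hf⟩
      · refine Or.inl ⟨by simp [hcd, h1], ?_⟩
        simp only [List.mem_cons]
        rintro (h | h)
        · exact hcd h.symm
        · exact h2 h
      · refine Or.inr ⟨c :: b, t', by simp [he], ?_, ?_⟩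
        · simp only [List.mem_cons]
          rintro (h | h)
          · exact hcd h.symm
          · exact hb h
        · have hne : PySem.Chars.find t [d] ≠ -1 := by rw [hf]; intro hc; omega
          simp only [hcd, if_false, hne, hf, List.length_cons]
          push_cast
          ring

-- ---- match_domain ≡ suffix walk ----
def firstHit (ds : List String) : List (List Char) → Option (List Char)
  | [] => none
  | s :: r => if ds.contains (String.mk s) then some s else firstHit ds r

def sufs : List Char → List (List Char)
  | [] => []
  | c :: r => if c = '.' then r :: sufs r else sufs r

def allSufs : List (List Char) → List (List Char)
  | [] => []
  | q :: qs => PySem.Chars.join ['.'] (q :: qs) :: allSufs qs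

theorem mdLoopA_eq_firstHit (ds : List String) (parts : List (List Char)) :
    ∀ L, mdLoopA ds parts L =
      firstHit ds (L.map fun i => PySem.Chars.join ['.'] (PySem.List.slice parts (some i) none)) := by
  intro L
  induction L with
  | nil => simp [mdLoopA, firstHit]
  | cons i is ih =>
    simp only [mdLoopA, List.map_cons, firstHit]
    split <;> simp_all

theorem pyRange_one_eq (m : Nat) :
    PySem.List.pyRange 1 ((m + 1 : Nat) : Int) = (List.range m).map (fun j : Nat => ((j : Int) + 1)) := by
  rw [PySem.List.pyRange]
  rw [if_neg (by norm_num)]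
  rcases Nat.eq_zero_or_pos m with hm | hm
  · subst hm; norm_num
  · have h1 : (1:Int) < ((m+1:Nat):Int) := by push_cast; omega
    simp only [if_pos h1, if_pos (by norm_num : (0:Int) < 1)]
    have h2 : ((((m + 1:Nat):Int) - 1 + 1 - 1)/1).toNat = m := by push_cast; omega
    rw [h2]
    apply List.map_congr_left
    intro a ha
    ring

theorem range_map_join (ps : List (List Char)) :
    (List.range ps.length).map (fun j => PySem.Chars.join ['.'] (ps.drop j)) = allSufs ps := by
  induction ps with
  | nil => simp [allSufs]
  | cons q qs ih =>
    simp only [List.length_cons, List.range_succ_eq_map, List.map_cons, List.map_map, List.drop_zero]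
    show _ :: _ = allSufs (q :: qs)
    rw [allSufs, ← ih]
    congr 1

theorem intercalate_cons_cons' (s x y : List Char) (l : List (List Char)) :
    List.intercalate s (x :: y :: l) = x ++ s ++ List.intercalate s (y :: l) := by
  simp [List.intercalate, List.intersperse]

theorem join_mySplit (s : List Char) : PySem.Chars.join ['.'] (mySplit '.' s) = s := by
  induction s with
  | nil => simp [mySplit, PySem.Chars.join, List.intercalate]
  | cons c r ih =>
    simp only [mySplit]
    obtain ⟨p, ps, hps⟩ : ∃ p ps, mySplit '.' r = p :: ps := by
      cases h : mySplit '.' r with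
      | nil => exact absurd h (mySplit_ne_nil '.' r)
      | cons p ps => exact ⟨p, ps, rfl⟩
    by_cases hc : c = '.'
    · simp only [hc, if_true]
      rw [hps] at ih ⊢
      simp only [PySem.Chars.join] at ih ⊢
      rw [intercalate_cons_cons', ih]
      simp [hc]
    · simp only [hc, if_false]
      rw [hps] at ih ⊢
      simp only [List.modifyHead_cons, PySem.Chars.join] at ih ⊢
      cases ps with
      | nil => simp only [List.intercalate] at ih ⊢; simp at ih ⊢; simp [ih]
      | cons q qs =>
        rw [intercalate_cons_cons'] at ih ⊢
        simp [ih]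

theorem allSufs_tail_mySplit (s : List Char) : allSufs (mySplit '.' s).tail = sufs s := by
  induction s with
  | nil => simp [mySplit, allSufs, sufs]
  | cons c r ih =>
    obtain ⟨p, ps, hps⟩ : ∃ p ps, mySplit '.' r = p :: ps := by
      cases h : mySplit '.' r with
      | nil => exact absurd h (mySplit_ne_nil '.' r)
      | cons p ps => exact ⟨p, ps, rfl⟩
    by_cases hc : c = '.'
    · simp only [mySplit, hc, if_true, List.tail_cons, sufs]
      rw [hps, allSufs]
      have hj : PySem.Chars.join ['.'] (p :: ps) = r := by rw [← hps]; exact join_mySplit r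
      rw [hj]
      rw [hps, List.tail_cons] at ih
      rw [ih]
    · simp only [mySplit, hc, if_false, sufs]
      rw [hps, List.modifyHead_cons, List.tail_cons]
      rw [hps, List.tail_cons] at ih
      exact ih

theorem sufs_no_dot (s : List Char) (h : '.' ∉ s) : sufs s = [] := by
  induction s with
  | nil => simp [sufs]
  | cons c r ih =>
    have h1 : ¬ c = '.' := fun he => h (by simp [he])
    have h2 : '.' ∉ r := fun he => h (by simp [he])
    simp only [sufs, h1, if_false]
    exact ih h2

theorem sufs_structure (b t : List Char) (hb : '.' ∉ b) : sufs (b ++ '.' :: t) = t :: sufs t := by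
  induction b with
  | nil => simp [sufs]
  | cons c b' ih =>
    have h1 : ¬ c = '.' := fun he => hb (by simp [he])
    have h2 : '.' ∉ b' := fun he => hb (by simp [he])
    simp only [List.cons_append, sufs, h1, if_false]
    exact ih h2

theorem dotLoopB_eq_firstHit_aux (ds : List String) : ∀ (n : Nat) (rest : List Char), rest.length ≤ n →
    dotLoopB ds rest = firstHit ds (sufs rest) := by
  intro n
  induction n with
  | zero =>
    intro rest h
    have : rest = [] := by cases rest <;> simp_all
    subst this
    rw [dotLoopB]
    simp [PySem.Chars.isIn, find_nil', sufs, firstHit]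
  | succ n ih =>
    intro rest hlen
    rw [dotLoopB]
    rcases find_single '.' rest with ⟨hf, hmem⟩ | ⟨b, t, he, hb, hf⟩
    · rw [dif_neg (by simp [PySem.Chars.isIn, hf])]
      rw [sufs_no_dot rest hmem]
      rfl
    · rw [dif_pos (by simp [PySem.Chars.isIn, hf])]
      have hdrop : PySem.List.slice rest (some (PySem.Chars.find rest ['.'] + 1)) none = t := by
        rw [PySem.List.slice_from _ (by rw [hf]; omega)]
        rw [hf]
        have h1 : ((b.length : Int) + 1).toNat = b.length + 1 := by omega
        rw [h1, he]
        rw [show b.length + 1 = (b ++ ['.']).length by simp]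
        rw [show b ++ '.' :: t = (b ++ ['.']) ++ t by simp]
        simp
      simp only [hdrop]
      have hsufs : sufs rest = t :: sufs t := by rw [he]; exact sufs_structure b t hb
      rw [hsufs, firstHit]
      have htlen : t.length ≤ n := by
        have : rest.length = b.length + 1 + t.length := by rw [he]; simp; omega
        omega
      split
      · rfl
      · exact ih t htlen

theorem dotLoopB_eq_firstHit (ds : List String) (rest : List Char) : dotLoopB ds rest = firstHit ds (sufs rest) :=
  dotLoopB_eq_firstHit_aux ds rest.length rest le_rfl

theorem match_eq (c : List Char) (ds : List String) : match_domainA c ds = suffixMatchB c ds := by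
  unfold match_domainA suffixMatchB
  by_cases hc : c = []
  · simp [hc]
  simp only [hc, if_false]
  by_cases hm : (String.mk (PySem.Chars.stripChars (PySem.Chars.lower c) ['.'])) ∈ ds
  · simp [hm]
  simp only [List.contains_eq_mem, hm, decide_false, Bool.false_eq_true, if_false]
  set cand := PySem.Chars.stripChars (PySem.Chars.lower c) ['.'] with hcand
  have hparts : (PySem.Chars.split? cand ['.']).getD [] = mySplit '.' cand := by
    simp [PySem.Chars.split?, splitOn_eq]
  rw [hparts, mdLoopA_eq_firstHit, dotLoopB_eq_firstHit]
  obtain ⟨p, ps, hps⟩ : ∃ p ps, mySplit '.' cand = p :: ps := by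
    cases h : mySplit '.' cand with
    | nil => exact absurd h (mySplit_ne_nil '.' cand)
    | cons p ps => exact ⟨p, ps, rfl⟩
  rw [hps]
  have hlen : ((p :: ps).length : Int) = ((ps.length + 1 : Nat) : Int) := by simp
  rw [hlen, pyRange_one_eq, List.map_map]
  have hmap : (List.range ps.length).map
      ((fun i => PySem.Chars.join ['.'] (PySem.List.slice (p :: ps) (some i) none)) ∘ (fun j : Nat => ((j : Int) + 1)))
      = (List.range ps.length).map (fun j => PySem.Chars.join ['.'] (ps.drop j)) := by
    apply List.map_congr_left
    intro j hj
    simp only [Function.comp_apply]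
    rw [PySem.List.slice_from _ (by omega : (0:Int) ≤ (j : Int) + 1)]
    have h1 : ((j : Int) + 1).toNat = j + 1 := by omega
    rw [h1, List.drop_succ_cons]
  rw [hmap, range_map_join]
  have : allSufs ps = sufs cand := by
    rw [← allSufs_tail_mySplit cand, hps, List.tail_cons]
  rw [this]

-- ---- the '@' scan ----
def phi (ds : List String) (t : List Char) : Option (List Char) :=
  let next : Option (List Char) :=
    if h : PySem.Chars.find t ['@'] = -1 then none
    else phi ds (t.drop ((PySem.Chars.find t ['@']).toNat + 1))
  match suffixMatchB (t.takeWhile wcA) ds with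
  | some v => if v = [] then next else some v
  | none => next
termination_by t.length
decreasing_by
  have h0 : 0 ≤ PySem.Chars.find t ['@'] := by
    have := PySem.Chars.neg_one_le_find (s := t) (sub := ['@'])
    omega
  have hsp := (PySem.Chars.find_spec h0).1
  have hlt : (PySem.Chars.find t ['@']).toNat < t.length := by
    rcases hsp with ⟨w, hw⟩
    have hne : t.drop (PySem.Chars.find t ['@']).toNat ≠ [] := by
      intro hnil; rw [hnil] at hw; simp at hw
    have hp := List.length_pos_of_ne_nil hne
    simp only [List.length_drop] at hp
    omega
  simp only [List.length_drop]
  omega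

def psi (ds : List String) (s : List Char) : Option (List Char) :=
  if _h : PySem.Chars.find s ['@'] = -1 then none
  else phi ds (s.drop ((PySem.Chars.find s ['@']).toNat + 1))

theorem phi_eq (ds : List String) (t : List Char) :
    phi ds t =
      match suffixMatchB (t.takeWhile wcA) ds with
      | some v => if v = [] then psi ds t else some v
      | none => psi ds t := by
  rw [phi, psi]

theorem wcA_at : wcA '@' = false := by decide

theorem psi_cons (ds : List String) (c : Char) (r : List Char) (hc : c ≠ '@') :
    psi ds (c :: r) = psi ds r := by
  rw [psi, psi, find_cons '@' c r]
  simp only [hc, if_false]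
  by_cases hf : PySem.Chars.find r ['@'] = -1
  · simp [hf]
  · have h0 : 0 ≤ PySem.Chars.find r ['@'] := by
      have := PySem.Chars.neg_one_le_find (s := r) (sub := ['@'])
      omega
    simp only [hf, if_false]
    have h1 : (PySem.Chars.find r ['@'] + 1).toNat = (PySem.Chars.find r ['@']).toNat + 1 := by omega
    rw [h1, List.drop_succ_cons]
    simp
    intro hcc
    exfalso
    omega

theorem psi_append (ds : List String) (u v : List Char) (hu : '@' ∉ u) :
    psi ds (u ++ v) = psi ds v := by
  induction u with
  | nil => simp
  | cons c u' ih =>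
    have hc : c ≠ '@' := fun he => hu (by simp [he])
    have hu' : '@' ∉ u' := fun he => hu (by simp [he])
    rw [List.cons_append, psi_cons ds c (u' ++ v) hc]
    exact ih hu'

theorem fedEndA_eq_aux (s : List Char) : ∀ (n e : Nat), s.length - e ≤ n →
    fedEndA s e = e + (List.takeWhile wcA (s.drop e)).length := by
  intro n
  induction n with
  | zero =>
    intro e h
    rw [fedEndA, dif_neg (by omega)]
    rw [List.drop_eq_nil_of_le (by omega)]
    simp
  | succ n ih =>
    intro e h
    rw [fedEndA]
    by_cases he : e < s.length
    · rw [dif_pos he]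
      rw [List.drop_eq_getElem_cons he, List.takeWhile_cons]
      cases hw : wcA s[e] with
      | true =>
        simp only [if_true]
        rw [ih (e+1) (by omega)]
        simp
        omega
      | false => simp [hw]
    · rw [dif_neg he]
      rw [List.drop_eq_nil_of_le (by omega)]
      simp

theorem fedEndA_eq (s : List Char) (e : Nat) :
    fedEndA s e = e + (List.takeWhile wcA (s.drop e)).length :=
  fedEndA_eq_aux s (s.length - e) e le_rfl

theorem wcA_ne_at {c : Char} (h : wcA c = true) : c ≠ '@' := by
  rintro rfl
  exact absurd h (by decide)

theorem at_not_mem_takeWhile (t : List Char) : '@' ∉ List.takeWhile wcA t := by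
  intro hm
  exact absurd (List.mem_takeWhile_imp hm) (by decide)

theorem drop_takeWhile_length (p : Char → Bool) (l : List Char) :
    l.drop (l.takeWhile p).length = l.dropWhile p := by
  induction l with
  | nil => simp
  | cons c r ih => cases hw : p c <;> simp [List.dropWhile_cons, hw, ih]

theorem fedLoopA_eq (s : List Char) (ds : List String) :
    ∀ (fuel k : Nat), k ≤ s.length → List.count '@' (s.drop k) < fuel →
      fedLoopA s ds k fuel = psi ds (s.drop k) := by
  intro fuel
  induction fuel with
  | zero => intro k hk hcnt; omega
  | succ fuel ih =>
    intro k hk hcnt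
    rw [fedLoopA]
    rw [PySem.Chars.findFrom_natCast s ['@'] k hk]
    rcases find_single '@' (s.drop k) with ⟨hf, _⟩ | ⟨b, t, he, hb, hf⟩
    · rw [if_pos (by rw [if_pos hf])]
      rw [psi, dif_pos hf]
    · have hne : PySem.Chars.find (s.drop k) ['@'] ≠ -1 := by rw [hf]; intro hcc; omega
      have hlen : (s.drop k).length = b.length + 1 + t.length := by rw [he]; simp; omega
      have hslen : s.length = k + (b.length + 1 + t.length) := by
        have := List.length_drop (l := s) (i := k)
        omega
      have hat : (if PySem.Chars.find (s.drop k) ['@'] = -1 then (-1 : Int)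
          else (k : Int) + PySem.Chars.find (s.drop k) ['@']) = ((k + b.length : Nat) : Int) := by
        rw [if_neg hne, hf]
        push_cast
        ring
      rw [hat]
      rw [if_neg (by intro hcc; omega)]
      have htn : (((k + b.length : Nat) : Int)).toNat = k + b.length := by omega
      rw [htn]
      have hdropt : s.drop (k + b.length + 1) = t := by
        rw [show k + b.length + 1 = k + (b.length + 1) by omega]
        rw [← List.drop_drop (j := k), he]
        rw [show b ++ '@' :: t = (b ++ ['@']) ++ t by simp]
        rw [show b.length + 1 = (b ++ ['@']).length by simp]
        simp
      have hE : fedEndA s (k + b.length + 1) = (k + b.length + 1) + (List.takeWhile wcA t).length := by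
        rw [fedEndA_eq, hdropt]
      rw [hE]
      have htwle : (List.takeWhile wcA t).length ≤ t.length := (List.takeWhile_sublist wcA).length_le
      have hcand : PySem.List.slice s (some (((k + b.length : Nat) : Int) + 1))
          (some ((((k + b.length + 1) + (List.takeWhile wcA t).length : Nat) : Int))) = List.takeWhile wcA t := by
        rw [show (((k + b.length : Nat) : Int) + 1) = (((k + b.length + 1 : Nat)) : Int) by push_cast; ring]
        rw [PySem.List.slice_natCast]
        rw [hdropt]
        rw [show (k + b.length + 1) + (List.takeWhile wcA t).length - (k + b.length + 1)
            = (List.takeWhile wcA t).length by omega]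
        exact (List.prefix_iff_eq_take.mp (List.takeWhile_prefix wcA)).symm
      have hpsi : psi ds (s.drop k) = phi ds t := by
        rw [psi, dif_neg hne, hf]
        congr 1
        rw [he, show ((b.length : Int)).toNat = b.length by omega]
        rw [show b ++ '@' :: t = (b ++ ['@']) ++ t by simp]
        rw [show b.length + 1 = (b ++ ['@']).length by simp]
        simp
      have hrec : fedLoopA s ds ((k + b.length + 1) + (List.takeWhile wcA t).length) fuel = psi ds t := by
        have hdropE : s.drop ((k + b.length + 1) + (List.takeWhile wcA t).length)
            = t.drop (List.takeWhile wcA t).length := by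
          rw [← List.drop_drop (j := k + b.length + 1), hdropt]
        have hcntt : List.count '@' t < fuel := by
          have : List.count '@' (s.drop k) = List.count '@' b + 1 + List.count '@' t := by
            rw [he, List.count_append]
            simp
            omega
          have hzb : List.count '@' b = 0 := List.count_eq_zero.mpr hb
          omega
        have hcntE : List.count '@' (s.drop ((k + b.length + 1) + (List.takeWhile wcA t).length)) < fuel := by
          rw [hdropE]
          have := List.Sublist.count_le '@' (List.drop_sublist (List.takeWhile wcA t).length t)
          omega
        rw [ih _ (by omega) hcntE, hdropE]
        have hsplit : List.takeWhile wcA t ++ List.dropWhile wcA t = t := List.takeWhile_append_dropWhile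
        calc psi ds (t.drop (List.takeWhile wcA t).length)
            = psi ds (List.dropWhile wcA t) := by rw [drop_takeWhile_length]
          _ = psi ds (List.takeWhile wcA t ++ List.dropWhile wcA t) :=
              (psi_append ds _ _ (at_not_mem_takeWhile t)).symm
          _ = psi ds t := by rw [hsplit]
      simp only [hE, hcand, match_eq, hrec, hpsi, phi_eq]

theorem mySplit_head (r : List Char) : mySplit '@' r = (r.takeWhile (· != '@')) :: (mySplit '@' r).tail := by
  induction r with
  | nil => simp [mySplit]
  | cons c u ih =>
    by_cases hc : c = '@'
    · simp [mySplit, hc]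
    · simp only [mySplit, hc, if_false]
      rw [ih, List.modifyHead_cons, List.takeWhile_cons]
      have : (c != '@') = true := by simp [hc]
      simp [this]

theorem takeRunB_eq (l : List Char) : takeRunB l = l.takeWhile wcB := by
  induction l with
  | nil => simp [takeRunB]
  | cons c r ih =>
    rw [takeRunB, List.takeWhile_cons]
    cases hw : wcB c <;> simp [hw, ih]

theorem wcB_eq : wcB = wcA := rfl

theorem smB_nil (ds : List String) : suffixMatchB [] ds = none := by
  simp [suffixMatchB]

theorem psi_nil (ds : List String) : psi ds [] = none := by
  rw [psi]
  exact dif_pos (find_nil' '@')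

theorem phi_nil (ds : List String) : phi ds [] = none := by
  rw [phi_eq]
  simp [smB_nil, psi_nil]

theorem psi_at_cons (ds : List String) (r : List Char) : psi ds ('@' :: r) = phi ds r := by
  have h0 : PySem.Chars.find ('@' :: r) ['@'] = 0 := by rw [find_cons]; simp
  rw [psi, dif_neg (by rw [h0]; omega), h0]
  simp

theorem twA_tw (l : List Char) :
    List.takeWhile wcA (List.takeWhile (· != '@') l) = List.takeWhile wcA l := by
  rw [List.takeWhile_takeWhile]
  have hpred : (fun a => decide (wcA a = true ∧ (a != '@') = true)) = wcA := by
    funext a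
    by_cases h : wcA a = true
    · simp [h, wcA_ne_at h]
    · simp only [Bool.not_eq_true] at h
      simp [h]
  rw [hpred]

theorem fedLoopB_join (ds : List String) : ∀ (n : Nat) (t : List Char), t.length ≤ n →
    (fedLoopB ds (mySplit '@' t) = phi ds t ∧ fedLoopB ds (mySplit '@' t).tail = psi ds t) := by
  intro n
  induction n with
  | zero =>
    intro t ht
    have : t = [] := by cases t <;> simp_all
    subst this
    constructor
    · show fedLoopB ds [[]] = phi ds []
      rw [fedLoopB, takeRunB]
      simp only [smB_nil]
      rw [fedLoopB, phi_nil]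
    · show fedLoopB ds [[]].tail = psi ds []
      rw [List.tail_cons, fedLoopB, psi_nil]
  | succ n ih =>
    intro t ht
    cases t with
    | nil =>
      constructor
      · show fedLoopB ds [[]] = phi ds []
        rw [fedLoopB, takeRunB]
        simp only [smB_nil]
        rw [fedLoopB, phi_nil]
      · show fedLoopB ds [[]].tail = psi ds []
        rw [List.tail_cons, fedLoopB, psi_nil]
    | cons c r =>
      have hr : r.length ≤ n := by simp at ht; omega
      obtain ⟨ihM, ihT⟩ := ih r hr
      by_cases hc : c = '@'
      · subst hc
        have hms : mySplit '@' ('@' :: r) = [] :: mySplit '@' r := by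
          simp [mySplit]
        constructor
        · rw [hms, fedLoopB, takeRunB]
          simp only [smB_nil]
          rw [ihM]
          have htw : List.takeWhile wcA ('@' :: r) = [] := by
            rw [List.takeWhile_cons]
            simp [wcA_at]
          conv_rhs => rw [phi_eq]
          rw [htw]
          simp only [smB_nil]
          rw [psi_at_cons]
        · rw [hms, List.tail_cons, ihM, psi_at_cons]
      · obtain ⟨p, ps, hps⟩ : ∃ p ps, mySplit '@' r = p :: ps := by
          cases h : mySplit '@' r with
          | nil => exact absurd h (mySplit_ne_nil '@' r)
          | cons p ps => exact ⟨p, ps, rfl⟩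
        have hp : p = r.takeWhile (· != '@') := by
          have := mySplit_head r
          rw [hps] at this
          exact (List.cons.injEq _ _ _ _ ▸ this).1
        have hms : mySplit '@' (c :: r) = (c :: p) :: ps := by
          simp only [mySplit, hc, if_false, hps, List.modifyHead_cons]
        have hcand : takeRunB (c :: p) = List.takeWhile wcA (c :: r) := by
          rw [takeRunB_eq, wcB_eq, hp]
          have hcp : (c :: List.takeWhile (· != '@') r) = List.takeWhile (· != '@') (c :: r) := by
            rw [List.takeWhile_cons]
            simp [hc]
          rw [hcp, twA_tw]
        have htail : fedLoopB ds ps = psi ds (c :: r) := by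
          have hpt : (mySplit '@' r).tail = ps := by rw [hps, List.tail_cons]
          rw [← hpt, ihT, psi_cons ds c r hc]
        constructor
        · rw [hms, fedLoopB, hcand, phi_eq]
          cases hsm : suffixMatchB (List.takeWhile wcA (c :: r)) ds with
          | none => exact htail
          | some v =>
            by_cases hv : v = []
            · simp only [hv, if_pos rfl]
              exact htail
            · simp only [if_neg hv]
        · rw [hms, List.tail_cons]
          exact htail

-- ===== VERDICT (by name: the statement is the Claim_ definition above) =====
theorem find_email_domain_spec : Claim_equal_find_email_domain := by
  intro line ds _
  simp only [Spec_find_email_domain, find_email_domain, find_email_domain_alt]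
  have hA : fedLoopA line.toList ds 0 (line.toList.length + 1) = psi ds line.toList := by
    have := fedLoopA_eq line.toList ds (line.toList.length + 1) 0 (by omega)
      (by simpa using Nat.lt_succ_of_le (List.count_le_length))
    simpa using this
  have hB : (PySem.Chars.split? line.toList ['@']).getD [] = mySplit '@' line.toList := by
    simp [PySem.Chars.split?, splitOn_eq]
  have hs : PySem.List.slice (mySplit '@' line.toList) (some 1) none = (mySplit '@' line.toList).tail := by
    rw [PySem.List.slice_from _ (by omega : (0:Int) ≤ 1)]
    simp [List.drop_one]
  rw [hA, hB, hs, (fedLoopB_join ds line.toList.length line.toList le_rfl).2]
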